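-- pv_equiv track=rewrite | github.com/worldsbestcode/2S0t2a4r0g3a1z5r | fxweb/python/fx/application/byok/utils/diebold.py | _factoradic
-- ===== SOURCE A (Python) =====
-- from itertools import count
-- from typing import Callable, List, MutableSequence, Tuple, Union
--
-- def _factoradic(n: int, pad_length: int) -> Tuple[int, ...]:
--     """Convert to factorial base, padded up to length (on the left)"""
--     if n < 0:
--         raise ValueError
--
--     result = []
--     radix = count(1)
--     while n:
--         n, digit = divmod(n, next(radix))
--         result.append(digit)
--
--     num_padding = max(pad_length - len(result), 0)
--
--     return (*[0] * num_padding, *reversed(result))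
-- ===== SOURCE B (Python) =====
-- def _factoradic(n, pad_length):
--     """Convert to factorial base (most significant digit first) by dividing
--     out the precomputed factorials from the largest down, padded on the left."""
--     if n < 0:
--         raise ValueError
--
--     facts = []          # 0!, 1!, ..., (L-1)!  where L! > n
--     f, k = 1, 1
--     while f <= n:
--         facts.append(f)
--         f *= k
--         k += 1
--
--     digits = []
--     for f in reversed(facts):
--         d, n = divmod(n, f)
--         digits.append(d)
--
--     num_padding = max(pad_length - len(digits), 0)
--     return (*[0] * num_padding, *digits)
-- ===== Notes on version B (the rewrite author's own statement) =====
-- stated objective: alternative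
-- what changed: B precomputes the list of factorials up to n and emits digits most-significant-first by divmod with each factorial from largest down, instead of A's bottom-up repeated divmod by an increasing radix followed by a reversal.
import Mathlib
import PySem

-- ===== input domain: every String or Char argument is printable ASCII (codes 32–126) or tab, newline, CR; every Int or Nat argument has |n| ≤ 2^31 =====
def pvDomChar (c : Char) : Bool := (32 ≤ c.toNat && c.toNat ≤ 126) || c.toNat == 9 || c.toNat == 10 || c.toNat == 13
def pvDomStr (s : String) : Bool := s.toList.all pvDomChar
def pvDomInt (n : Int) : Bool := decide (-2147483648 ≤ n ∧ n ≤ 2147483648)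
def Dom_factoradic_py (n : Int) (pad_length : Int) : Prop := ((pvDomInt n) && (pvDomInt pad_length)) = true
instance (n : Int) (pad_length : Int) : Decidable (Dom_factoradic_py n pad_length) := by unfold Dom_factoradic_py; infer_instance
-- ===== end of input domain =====

-- B converts via precomputed factorials, most-significant digit first (no final reversal):
-- an alternative algorithm of the same cost; equivalence of return values proved for n ≥ 0.


-- ===== PORT A =====
-- the 'while n:' loop: emits n % radix and continues with n // radix, radix counting up from 1.
-- The 'radix < 1' test is a totality guard only (radix starts at 1 and only increments).
def pvALoop (n : Int) (radix : Int) : List Int :=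
  if radix < 1 then []
  else if h : n ≤ 0 then []
  else
    PySem.Int.mod n radix :: pvALoop (PySem.Int.floordiv n radix) (radix + 1)
termination_by 2 * n.toNat + (if radix ≤ 1 then 1 else 0)
decreasing_by
  have h1 : 1 ≤ radix := by omega
  have hq : PySem.Int.floordiv n radix = n / radix := PySem.Int.floordiv_eq_ediv_of_pos (by omega)
  rw [hq]
  rcases lt_or_ge radix 2 with hr | hr
  · have : radix = 1 := by omega
    subst this
    simp
  · have hlt : n / radix < n := by
      rw [Int.ediv_lt_iff_lt_mul (by omega)]
      nlinarith
    have h0 : 0 ≤ n / radix := Int.ediv_nonneg (by omega) (by omega)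
    have : (n / radix).toNat < n.toNat := by omega
    split <;> split <;> omega

def factoradic_py (n : Int) (pad_length : Int) : List Int :=
  if n < 0 then []  -- Python raises ValueError here; excluded by Pre_factoradic_py
  else
    let result := pvALoop n 1
    let num_padding := max (pad_length - (result.length : Int)) 0
    List.replicate num_padding.toNat 0 ++ result.reverse

-- ===== PORT B =====
-- grows the factorial list [0!, 1!, ..., (L-1)!] while f ≤ n (f = (k-1)!).
-- The 'f < 1 ∨ k < 1' test is a totality guard only (f is a factorial ≥ 1, k counts from 1).
def pvBFacts (n : Int) (f : Int) (k : Int) : List Int :=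
  if f < 1 ∨ k < 1 then []
  else if n < f then []
  else f :: pvBFacts n (f * k) (k + 1)
termination_by 2 * ((n.toNat + 1) - f.toNat) + (if k ≤ 1 then 1 else 0)
decreasing_by
  rename_i hg hnf
  have hf1 : 1 ≤ f := by omega
  have hk1 : 1 ≤ k := by omega
  have hfn : f ≤ n := by omega
  rcases lt_or_ge k 2 with hk | hk
  · have : k = 1 := by omega
    subst this
    simp only [mul_one]
    norm_num
  · have : f + 1 ≤ f * k := by nlinarith
    have h1 : f.toNat + 1 ≤ (f * k).toNat := by omega
    have h2 : f.toNat ≤ n.toNat := by omega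
    split <;> omega

def pvBDigits (n : Int) (fs : List Int) : List Int :=
  match fs with
  | [] => []
  | f :: rest => PySem.Int.floordiv n f :: pvBDigits (PySem.Int.mod n f) rest

def factoradic_py_alt (n : Int) (pad_length : Int) : List Int :=
  if n < 0 then []  -- Python raises ValueError here; excluded by Pre_factoradic_py
  else
    let facts := pvBFacts n 1 1
    let digits := pvBDigits n facts.reverse
    let num_padding := max (pad_length - (digits.length : Int)) 0
    List.replicate num_padding.toNat 0 ++ digits

-- ===== PRECONDITION & SPEC =====
-- Python raises ValueError exactly when n < 0; Pre_ excludes nothing else.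
def Pre_factoradic_py (n : Int) (pad_length : Int) : Prop := 0 ≤ n
instance (n : Int) (pad_length : Int) : Decidable (Pre_factoradic_py n pad_length) := by unfold Pre_factoradic_py; infer_instance
def pvWitness_factoradic_py : Int × Int := (5, 4)

def Spec_factoradic_py (n : Int) (pad_length : Int) (out : List Int) : Prop := out = factoradic_py_alt n pad_length
instance (n : Int) (pad_length : Int) (out : List Int) : Decidable (Spec_factoradic_py n pad_length out) := by unfold Spec_factoradic_py; infer_instance

-- ===== CLAIM (what is proved, stated in full; the proofs are below) =====
def Claim_equal_factoradic_py : Prop := ∀ (n : Int) (pad_length : Int), Dom_factoradic_py n pad_length → Pre_factoradic_py n pad_length → Spec_factoradic_py n pad_length (factoradic_py n pad_length)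

-- ===== LEMMAS AND PROOFS =====

-- pf r j = r * (r+1) * ... * (r+j-1); pf 1 j = j!
def pvPf (r : Int) : Nat → Int
  | 0 => 1
  | j + 1 => pvPf r j * (r + j)

theorem pvPf_pos (r : Int) (hr : 1 ≤ r) : ∀ j, 0 < pvPf r j := by
  intro j
  induction j with
  | zero => simp [pvPf]
  | succ j ih =>
    have : (0:Int) < r + j := by omega
    simpa [pvPf] using mul_pos ih this

theorem pvPf_shift (r : Int) : ∀ j, pvPf r (j + 1) = r * pvPf (r + 1) j := by
  intro j
  induction j with
  | zero => simp [pvPf]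
  | succ j ih =>
    have : pvPf r (j + 1 + 1) = pvPf r (j + 1) * (r + (j + 1)) := rfl
    rw [this, ih]
    have : pvPf (r + 1) (j + 1) = pvPf (r + 1) j * (r + 1 + j) := rfl
    rw [this]
    push_cast
    ring

theorem pvPf_succ (r : Int) (j : Nat) : pvPf r (j + 1) = pvPf r j * (r + j) := rfl

theorem pvPf_dvd (r : Int) (hr : 1 ≤ r) : ∀ {a b : Nat}, a ≤ b → pvPf r a ∣ pvPf r b := by
  intro a b hab
  induction b with
  | zero => simpa [Nat.le_zero.mp hab]
  | succ b ih =>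
    rcases Nat.lt_or_ge a (b+1) with h | h
    · exact Dvd.dvd.trans (ih (by omega)) ⟨r + b, rfl⟩
    · have : a = b + 1 := by omega
      subst this; exact dvd_rfl

-- div/mod exchange: (n / a) % b = (n % (a*b)) / a  for 0 < a, 0 < b
theorem pvExch (n a b : Int) (ha : 0 < a) (hb : 0 < b) :
    n / a % b = n % (a * b) / a := by
  conv_rhs => rw [Int.emod_def]
  have h1 : n / (a * b) = n / a / b := (Int.ediv_ediv_of_nonneg (le_of_lt ha)).symm
  rw [h1]
  have : n - a * b * (n / a / b) = n + (-(n / a / b) * b) * a := by ring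
  rw [this, Int.add_mul_ediv_right _ _ (by omega : a ≠ 0)]
  rw [Int.emod_def]
  ring

-- A's loop unfolded once (1 ≤ radix, 0 < n)
theorem pvALoop_cons (n radix : Int) (hr : 1 ≤ radix) (hn : 0 < n) :
    pvALoop n radix = n % radix :: pvALoop (n / radix) (radix + 1) := by
  rw [pvALoop]
  simp only [if_neg (by omega : ¬ radix < 1), dif_neg (by omega : ¬ n ≤ 0)]
  rw [PySem.Int.floordiv_eq_ediv_of_pos (by omega), PySem.Int.mod_eq_emod_of_pos (by omega)]

theorem pvALoop_nil (n radix : Int) (hn : n ≤ 0) : pvALoop n radix = [] := by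
  rw [pvALoop]; split
  · rfl
  · simp [hn]

-- A's result, closed form over its own length
theorem pvALoop_closed (n radix : Int) (hn : 0 ≤ n) (hr : 1 ≤ radix) :
    pvALoop n radix =
      (List.range (pvALoop n radix).length).map (fun j => n / pvPf radix j % (radix + j)) := by
  induction n, radix using pvALoop.induct with
  | case1 n radix hlt => omega
  | case2 n radix hge hle =>
    rw [pvALoop_nil n radix hle]; rfl
  | case3 n radix hge hpos ih =>
    have hn0 : 0 < n := by omega
    have hr1 : (1:Int) ≤ radix := by omega
    rw [pvALoop_cons n radix hr1 hn0]
    have hq0 : 0 ≤ n / radix := Int.ediv_nonneg hn (by omega)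
    have hq : PySem.Int.floordiv n radix = n / radix := PySem.Int.floordiv_eq_ediv_of_pos (by omega)
    rw [hq] at ih
    have ih' := ih hq0 (by omega)
    simp only [List.length_cons, List.range_succ_eq_map, List.map_cons, List.map_map]
    congr 1
    · simp [pvPf]
    · conv_lhs => rw [ih']
      apply List.map_congr_left
      intro j hj
      simp only [Function.comp_apply]
      have h1 : pvPf radix (j + 1) = radix * pvPf (radix + 1) j := pvPf_shift radix j
      have h2 : n / pvPf radix (j + 1) = n / radix / pvPf (radix + 1) j := by
        rw [h1, ← Int.ediv_ediv_of_nonneg (show (0:Int) ≤ radix by omega)]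
      rw [← h2]
      congr 1
      push_cast; ring

-- n < pf radix L where L is A's length
theorem pvALoop_len_lt (n radix : Int) (hn : 0 ≤ n) (hr : 1 ≤ radix) :
    n < pvPf radix (pvALoop n radix).length := by
  induction n, radix using pvALoop.induct with
  | case1 n radix hlt => omega
  | case2 n radix hge hle =>
    rw [pvALoop_nil n radix hle]
    simpa [pvPf] using by omega
  | case3 n radix hge hpos ih =>
    have hn0 : 0 < n := by omega
    rw [pvALoop_cons n radix (by omega) hn0]
    have hq : PySem.Int.floordiv n radix = n / radix := PySem.Int.floordiv_eq_ediv_of_pos (by omega)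
    rw [hq] at ih
    have hq0 : 0 ≤ n / radix := Int.ediv_nonneg hn (by omega)
    have ih' := ih hq0 (by omega)
    simp only [List.length_cons]
    rw [pvPf_shift]
    have hmod := Int.emod_lt_of_pos n (by omega : (0:Int) < radix)
    have hdm := Int.ediv_add_emod n radix
    nlinarith [pvPf_pos (radix + 1) (by omega) (pvALoop (n / radix) (radix + 1)).length]

-- every earlier pf ≤ n
theorem pvALoop_len_ge (n radix : Int) (hn : 0 ≤ n) (hr : 1 ≤ radix) :
    ∀ m, m < (pvALoop n radix).length → pvPf radix m ≤ n := by
  induction n, radix using pvALoop.induct with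
  | case1 n radix hlt => omega
  | case2 n radix hge hle =>
    rw [pvALoop_nil n radix hle]; intro m hm; simp at hm
  | case3 n radix hge hpos ih =>
    have hn0 : 0 < n := by omega
    rw [pvALoop_cons n radix (by omega) hn0]
    have hq : PySem.Int.floordiv n radix = n / radix := PySem.Int.floordiv_eq_ediv_of_pos (by omega)
    rw [hq] at ih
    have hq0 : 0 ≤ n / radix := Int.ediv_nonneg hn (by omega)
    have ih' := ih hq0 (by omega)
    intro m hm
    cases m with
    | zero => simpa [pvPf] using by omega
    | succ m =>
      simp only [List.length_cons] at hm
      have := ih' m (by omega)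
      rw [pvPf_shift]
      have hdm := Int.ediv_add_emod n radix
      have hmod := Int.emod_nonneg n (by omega : radix ≠ 0)
      nlinarith

-- B's factorial list, characterized against a bound L with the two properties above
theorem pvBFacts_eq (n : Int) (hn : 0 ≤ n) (L : Nat)
    (hlt : n < pvPf 1 L) (hge : ∀ m, m < L → pvPf 1 m ≤ n) :
    ∀ j, j ≤ L → pvBFacts n (pvPf 1 j) (j + 1) = (List.range' j (L - j)).map (pvPf 1) := by
  intro j hj
  induction hd : L - j generalizing j with
  | zero =>
    have hjL : j = L := by omega
    have hpf := pvPf_pos 1 le_rfl j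
    rw [pvBFacts, if_neg (by omega), if_pos (by rw [hjL]; exact hlt)]
    simp [hd]
  | succ d ihd =>
    have hjL : j < L := by omega
    rw [pvBFacts]
    have hpf := pvPf_pos 1 le_rfl j
    have hle := hge j hjL
    rw [if_neg (by omega), if_neg (by omega)]
    have hstep : pvPf 1 j * ((j:Int) + 1) = pvPf 1 (j + 1) := by
      rw [pvPf_succ]; push_cast; ring
    rw [hstep]
    have := ihd (j + 1) (by omega) (by omega)
    push_cast at this
    rw [this]
    rw [List.range'_succ, List.map_cons]

-- B's digit extraction over reversed factorial prefix, closed form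
theorem pvBDigits_closed (L : Nat) : ∀ n : Int, 0 ≤ n → n < pvPf 1 L →
    pvBDigits n (((List.range L).map (pvPf 1)).reverse) =
      ((List.range L).map (fun j => n / pvPf 1 j % (1 + j))).reverse := by
  induction L with
  | zero => intro n hn hlt; simp [pvBDigits]
  | succ L ih =>
    intro n hn hlt
    rw [List.range_succ]
    simp only [List.map_append, List.reverse_append, List.map_cons, List.map_nil,
      List.reverse_cons, List.reverse_nil, List.nil_append, List.cons_append, List.singleton_append]
    rw [pvBDigits]
    have hpfL := pvPf_pos 1 le_rfl L
    have hq : PySem.Int.floordiv n (pvPf 1 L) = n / pvPf 1 L := PySem.Int.floordiv_eq_ediv_of_pos hpfL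
    have hm : PySem.Int.mod n (pvPf 1 L) = n % pvPf 1 L := PySem.Int.mod_eq_emod_of_pos hpfL
    rw [hq, hm]
    have hrem0 : 0 ≤ n % pvPf 1 L := Int.emod_nonneg n (by omega)
    have hremlt : n % pvPf 1 L < pvPf 1 L := Int.emod_lt_of_pos n hpfL
    rw [ih (n % pvPf 1 L) hrem0 hremlt]
    congr 1
    · -- top digit: n / pf L % (1 + L) = n / pf L  since n < pf (L+1)
      have hqlt : n / pvPf 1 L < 1 + L := by
        have h1 : pvPf 1 (L+1) = pvPf 1 L * (1 + (L:Int)) := pvPf_succ 1 L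
        rw [Int.ediv_lt_iff_lt_mul hpfL]
        calc n < pvPf 1 (L+1) := hlt
          _ = (1 + (L:Int)) * pvPf 1 L := by rw [h1]; ring
      have hq0 : 0 ≤ n / pvPf 1 L := Int.ediv_nonneg hn (le_of_lt hpfL)
      rw [Int.emod_eq_of_lt hq0 hqlt]
    · congr 1
      apply List.map_congr_left
      intro j hj
      have hjL : j < L := List.mem_range.mp hj
      have hpfj := pvPf_pos 1 le_rfl j
      have hj1 : (0:Int) < 1 + j := by positivity
      have hpfj1 : pvPf 1 (j+1) = pvPf 1 j * (1 + (j:Int)) := pvPf_succ 1 j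
      rw [pvExch _ _ _ hpfj hj1, pvExch _ _ _ hpfj hj1, ← hpfj1]
      congr 1
      exact Int.emod_emod_of_dvd n (pvPf_dvd 1 le_rfl (by omega : j + 1 ≤ L))

theorem pvMain (n : Int) (hn : 0 ≤ n) :
    (pvALoop n 1).reverse = pvBDigits n (pvBFacts n 1 1).reverse := by
  set L := (pvALoop n 1).length with hL
  have hlt : n < pvPf 1 L := pvALoop_len_lt n 1 hn le_rfl
  have hge : ∀ m, m < L → pvPf 1 m ≤ n := pvALoop_len_ge n 1 hn le_rfl
  have hfacts : pvBFacts n 1 1 = (List.range' 0 L).map (pvPf 1) := by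
    have := pvBFacts_eq n hn L hlt hge 0 (by omega)
    simpa [pvPf] using this
  rw [hfacts]
  have hrange : List.range' 0 L = List.range L := by
    simp [List.range_eq_range']
  rw [hrange]
  rw [pvBDigits_closed L n hn hlt]
  conv_lhs => rw [pvALoop_closed n 1 hn le_rfl]

-- ===== VERDICT (by name: the statement is the Claim_ definition above) =====
theorem factoradic_py_spec : Claim_equal_factoradic_py := by
  intro n pad_length _ hpre
  unfold Spec_factoradic_py factoradic_py factoradic_py_alt
  have hn : 0 ≤ n := hpre
  rw [if_neg (by omega), if_neg (by omega)]
  have hmain := pvMain n hn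
  simp only []
  rw [← hmain]
  have hlen : (pvBDigits n (pvBFacts n 1 1).reverse).length = (pvALoop n 1).length := by
    rw [← hmain]; simp
  rw [hlen] at *
  simp [← hmain, List.length_reverse]
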